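-- pv_equiv track=rewrite | github.com/defin85/command-center-1c | orchestrator/apps/databases/extensions_snapshot.py | _map_table_header
-- ===== SOURCE A (Python) =====
-- def _map_table_header(columns: list[str]) -> dict[str, str]:
--     lowered = {col: col.strip().lower() for col in columns}
--
--     def find(*names: str) -> str | None:
--         for col, low in lowered.items():
--             if low in names:
--                 return col
--         return None
--
--     out: dict[str, str] = {}
--     name_col = find("name", "extension")
--     if name_col:
--         out["name"] = name_col
--     version_col = find("version")
--     if version_col:
--         out["version"] = version_col
--     active_col = find("active", "enabled")
--     if active_col:
--         out["active"] = active_col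
--     return out
-- ===== SOURCE B (Python) =====
-- def _map_table_header(columns: list[str]) -> dict[str, str]:
--     name_col = version_col = active_col = None
--     for col in columns:
--         low = col.strip().lower()
--         if name_col is None and low in ("name", "extension"):
--             name_col = col
--         elif version_col is None and low == "version":
--             version_col = col
--         elif active_col is None and low in ("active", "enabled"):
--             active_col = col
--     out: dict[str, str] = {}
--     if name_col is not None:
--         out["name"] = name_col
--     if version_col is not None:
--         out["version"] = version_col
--     if active_col is not None:
--         out["active"] = active_col
--     return out
-- ===== Notes on version B (the rewrite author's own statement) =====
-- stated objective: simpler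
-- what changed: Replaces the intermediate lowered-dict plus three separate linear find scans with one forward pass that tracks the first matching column per field in three variables, then assembles the result.
import Mathlib
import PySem

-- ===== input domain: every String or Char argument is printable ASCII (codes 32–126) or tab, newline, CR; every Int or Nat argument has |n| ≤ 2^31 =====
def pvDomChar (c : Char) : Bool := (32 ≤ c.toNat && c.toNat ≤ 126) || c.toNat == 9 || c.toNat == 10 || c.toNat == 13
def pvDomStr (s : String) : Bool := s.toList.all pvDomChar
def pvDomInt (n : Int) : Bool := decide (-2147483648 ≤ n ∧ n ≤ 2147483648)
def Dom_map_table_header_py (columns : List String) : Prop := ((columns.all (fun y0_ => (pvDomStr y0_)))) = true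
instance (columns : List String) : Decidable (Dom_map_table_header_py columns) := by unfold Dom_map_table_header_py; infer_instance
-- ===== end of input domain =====

-- B replaces the lowered-dict plus three separate `find` scans by one forward pass
-- tracking the first matching column per field; goal: simpler (one pass, no intermediate dict).

-- shared primitive: col.strip().lower()
def pvLow (col : String) : String := PySem.Str.lower (PySem.Str.strip col)

-- ===== PORT A =====
-- the inner closure `find(*names)`: scan lowered.items() for the first low ∈ names
def pvFindA (items : List (String × String)) (names : List String) : Option String :=
  match items with
  | [] => none
  | (col, low) :: rest => if names.contains low then some col else pvFindA rest names

def map_table_header_py (columns : List String) : List (String × String) :=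
  let lowered : PySem.Dict String String :=
    columns.foldl (fun d col => d.insert col (pvLow col)) PySem.Dict.empty
  let out : PySem.Dict String String := PySem.Dict.empty
  let name_col := pvFindA lowered.items ["name", "extension"]
  let out := match name_col with
    | some c => if c ≠ "" then out.insert "name" c else out   -- `if name_col:` truthiness
    | none => out
  let version_col := pvFindA lowered.items ["version"]
  let out := match version_col with
    | some c => if c ≠ "" then out.insert "version" c else out
    | none => out
  let active_col := pvFindA lowered.items ["active", "enabled"]
  let out := match active_col with
    | some c => if c ≠ "" then out.insert "active" c else out
    | none => out
  out.items

-- ===== PORT B =====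
-- single forward pass: first matching column per field, elif chain, None guards
def pvScanB (cols : List String) (n v a : Option String) :
    Option String × Option String × Option String :=
  match cols with
  | [] => (n, v, a)
  | col :: rest =>
    let low := pvLow col
    if n = none ∧ (low = "name" ∨ low = "extension") then pvScanB rest (some col) v a
    else if v = none ∧ low = "version" then pvScanB rest n (some col) a
    else if a = none ∧ (low = "active" ∨ low = "enabled") then pvScanB rest n v (some col)
    else pvScanB rest n v a

def map_table_header_py_alt (columns : List String) : List (String × String) :=
  let (n, v, a) := pvScanB columns none none none
  let out : PySem.Dict String String := PySem.Dict.empty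
  let out := match n with | some c => out.insert "name" c | none => out
  let out := match v with | some c => out.insert "version" c | none => out
  let out := match a with | some c => out.insert "active" c | none => out
  out.items

-- ===== PRECONDITION & SPEC =====
def Spec_map_table_header_py (columns : List String) (out : List (String × String)) : Prop := out = map_table_header_py_alt columns
instance (columns : List String) (out : List (String × String)) : Decidable (Spec_map_table_header_py columns out) := by unfold Spec_map_table_header_py; infer_instance

-- ===== CLAIM (what is proved, stated in full; the proofs are below) =====
def Claim_equal_map_table_header_py : Prop := ∀ (columns : List String), Dom_map_table_header_py columns → Spec_map_table_header_py columns (map_table_header_py columns)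

-- ===== LEMMAS AND PROOFS =====

-- "first column whose stripped-lowered form is in names", straight over the column list
def pvFirst (cols : List String) (names : List String) : Option String :=
  match cols with
  | [] => none
  | c :: rest => if names.contains (pvLow c) then some c else pvFirst rest names

theorem pvFindA_append (xs ys : List (String × String)) (names : List String) :
    pvFindA (xs ++ ys) names =
      (match pvFindA xs names with | some c => some c | none => pvFindA ys names) := by
  induction xs with
  | nil => simp [pvFindA]
  | cons p rest ih =>
      obtain ⟨c, l⟩ := p
      simp only [List.cons_append, pvFindA]
      split
      · rfl
      · exact ih

theorem pvFindA_eq_none (items : List (String × String)) (names : List String)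
    (h : pvFindA items names = none) : ∀ p ∈ items, p.2 ∉ names := by
  induction items with
  | nil => simp
  | cons p rest ih =>
      obtain ⟨c, l⟩ := p
      by_cases hc : l ∈ names
      · simp [pvFindA, hc] at h
      · simp only [pvFindA, List.contains_eq_mem, hc, decide_false, Bool.false_eq_true,
          if_false] at h
        intro q hq
        rcases List.mem_cons.mp hq with hq | hq
        · subst hq; exact hc
        · exact ih h q hq

theorem pvFirst_eq_some (cols names : List String) (c : String)
    (h : pvFirst cols names = some c) : pvLow c ∈ names := by
  induction cols with
  | nil => simp [pvFirst] at h
  | cons x rest ih =>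
      by_cases hx : pvLow x ∈ names
      · simp [pvFirst, hx] at h; subst h; exact hx
      · simp [pvFirst, hx] at h; exact ih h

-- main A-side lemma: the find over the lowered dict = pvFirst over the raw columns
theorem findA_foldl (names : List String) (cols : List String)
    (d : PySem.Dict String String)
    (hinv : ∀ p ∈ d.items, p.2 = pvLow p.1) (hnd : d.keys.Nodup) :
    pvFindA ((cols.foldl (fun d col => d.insert col (pvLow col)) d).items) names =
      (match pvFindA d.items names with | some c => some c | none => pvFirst cols names) := by
  induction cols generalizing d with
  | nil => cases h : pvFindA d.items names <;> simp [pvFirst, h]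
  | cons c rest ih =>
      have hinv' : ∀ p ∈ (d.insert c (pvLow c)).items, p.2 = pvLow p.1 := by
        intro p hp
        rcases (PySem.Dict.mem_items_insert _ _ _ _).1 hp with hp | hp
        · simp [hp]
        · exact hinv p hp.1
      have hnd' : (d.insert c (pvLow c)).keys.Nodup := PySem.Dict.nodup_keys_insert d c (pvLow c) hnd
      have hstep := ih (d.insert c (pvLow c)) hinv' hnd'
      simp only [List.foldl_cons]
      rw [hstep]
      by_cases hc : d.contains c = true
      · -- overwrite with the same value: items unchanged
        have hitems : (d.insert c (pvLow c)).items = d.items := by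
          rw [PySem.Dict.items_insert, if_pos hc]
          have : ∀ p ∈ d.items,
              (fun p : String × String => if p.1 == c then (c, pvLow c) else p) p = id p := by
            intro p hp
            by_cases h1 : p.1 = c
            · have h2 := hinv p hp
              obtain ⟨pk, pv⟩ := p
              simp only at h1 h2
              subst h1; subst h2
              simp
            · simp [h1]
          rw [List.map_congr_left this, List.map_id]
        rw [hitems]
        cases h : pvFindA d.items names with
        | some x => rfl
        | none =>
            -- c is a key of d, its value is pvLow c, and no value of d matches
            have hmem : ∃ p ∈ d.items, p.1 = c := by
              have := (PySem.Dict.contains_iff_mem_keys (d := d) (k := c)).1 hc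
              simpa [PySem.Dict.keys, List.mem_map] using this
            obtain ⟨p, hp, hp1⟩ := hmem
            have hval : p.2 = pvLow c := by rw [hinv p hp, hp1]
            have hno := pvFindA_eq_none d.items names h p hp
            rw [hval] at hno
            simp [pvFirst, hno]
      · -- new key: appended at the end
        have hitems : (d.insert c (pvLow c)).items = d.items ++ [(c, pvLow c)] := by
          apply PySem.Dict.items_insert_of_not_contains
          simpa using hc
        rw [hitems, pvFindA_append]
        cases h : pvFindA d.items names with
        | some x => rfl
        | none =>
            by_cases hl : pvLow c ∈ names <;>
              simp [pvFindA, pvFirst, hl]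

theorem findA_lowered (names : List String) (cols : List String) :
    pvFindA ((cols.foldl (fun d col => d.insert col (pvLow col))
        (PySem.Dict.empty : PySem.Dict String String)).items) names = pvFirst cols names := by
  have h := findA_foldl names cols PySem.Dict.empty (by intro p hp; simp [PySem.Dict.empty, PySem.Dict.items] at hp)
      (by simpa using PySem.Dict.nodup_keys_empty (κ := String) (ν := String))
  simpa [PySem.Dict.empty, PySem.Dict.items, pvFindA] using h

-- B-side lemma: the single pass computes the three pvFirst's, componentwise
theorem scanB_eq (cols : List String) (n v a : Option String) :
    pvScanB cols n v a =
      ((match n with | some x => some x | none => pvFirst cols ["name", "extension"]),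
       (match v with | some x => some x | none => pvFirst cols ["version"]),
       (match a with | some x => some x | none => pvFirst cols ["active", "enabled"])) := by
  induction cols generalizing n v a with
  | nil => cases n <;> cases v <;> cases a <;> simp [pvScanB, pvFirst]
  | cons c rest ih =>
      simp only [pvScanB]
      by_cases h1 : pvLow c = "name" ∨ pvLow c = "extension"
      · have hv : ¬ (pvLow c = "version") := by rcases h1 with h | h <;> simp [h]
        have ha : ¬ (pvLow c = "active" ∨ pvLow c = "enabled") := by
          rcases h1 with h | h <;> simp [h]
        cases n <;>
          simp [h1, hv, ha, ih, pvFirst, List.contains_eq_mem]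
      · by_cases h2 : pvLow c = "version"
        · have ha : ¬ (pvLow c = "active" ∨ pvLow c = "enabled") := by simp [h2]
          cases n <;> cases v <;>
            simp [h1, h2, ha, ih, pvFirst, List.contains_eq_mem]
        · by_cases h3 : pvLow c = "active" ∨ pvLow c = "enabled"
          · cases n <;> cases v <;> cases a <;>
              simp [h1, h2, h3, ih, pvFirst, List.contains_eq_mem]
          · simp [h1, h2, h3, ih, pvFirst, List.contains_eq_mem]

-- a found column is never the empty string (so A's truthiness test always passes)
theorem pvFirst_ne_empty (cols names : List String) (c : String)
    (hn : pvLow "" ∉ names) (h : pvFirst cols names = some c) : c ≠ "" := by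
  intro hc
  have := pvFirst_eq_some cols names c h
  rw [hc] at this
  exact hn this

-- ===== VERDICT (by name: the statement is the Claim_ definition above) =====
theorem map_table_header_py_spec : Claim_equal_map_table_header_py := by
  intro columns _
  unfold Spec_map_table_header_py map_table_header_py map_table_header_py_alt
  simp only [findA_lowered, scanB_eq]
  cases hn : pvFirst columns ["name", "extension"] with
  | none =>
      cases hv : pvFirst columns ["version"] with
      | none =>
          cases ha : pvFirst columns ["active", "enabled"] with
          | none => rfl
          | some c => simp [pvFirst_ne_empty _ _ _ (by decide) ha]
      | some c =>
          have hc := pvFirst_ne_empty _ _ _ (by decide) hv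
          cases ha : pvFirst columns ["active", "enabled"] with
          | none => simp [hc]
          | some c' => simp [hc, pvFirst_ne_empty _ _ _ (by decide) ha]
  | some c =>
      have hc := pvFirst_ne_empty _ _ _ (by decide) hn
      cases hv : pvFirst columns ["version"] with
      | none =>
          cases ha : pvFirst columns ["active", "enabled"] with
          | none => simp [hc]
          | some c' => simp [hc, pvFirst_ne_empty _ _ _ (by decide) ha]
      | some c' =>
          have hc' := pvFirst_ne_empty _ _ _ (by decide) hv
          cases ha : pvFirst columns ["active", "enabled"] with
          | none => simp [hc, hc']
          | some c'' => simp [hc, hc', pvFirst_ne_empty _ _ _ (by decide) ha]
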